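-- pv_equiv track=rewrite | github.com/ohyoungjooung2/pycode | submax.py | submax2
-- ===== SOURCE A (Python) =====
-- def submax2(a):
--     a = sorted(a)
--     maxv = 0
--     for i in a:
--         c = a.count(i)
--         d = a.count(i-1)
--         c = c+d
--         if c > maxv:
--             maxv = c
--     return maxv
-- ===== SOURCE B (Python) =====
-- def submax2(a):
--     s = sorted(a)
--     n = len(s)
--     best = 0
--     prev_val = None
--     prev_cnt = 0
--     i = 0
--     while i < n:
--         j = i
--         while j < n and s[j] == s[i]:
--             j += 1
--         c = j - i
--         t = c + (prev_cnt if prev_val == s[i] - 1 else 0)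
--         if t > best:
--             best = t
--         prev_val = s[i]
--         prev_cnt = c
--         i = j
--     return best
-- ===== Notes on version B (the rewrite author's own statement) =====
-- stated objective: faster
-- what changed: Sorts once and does a single run-length scan over the sorted list, carrying the previous distinct value and its run length to add the v-1 neighbor count, instead of A's repeated a.count scans for every element.
import Mathlib
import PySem

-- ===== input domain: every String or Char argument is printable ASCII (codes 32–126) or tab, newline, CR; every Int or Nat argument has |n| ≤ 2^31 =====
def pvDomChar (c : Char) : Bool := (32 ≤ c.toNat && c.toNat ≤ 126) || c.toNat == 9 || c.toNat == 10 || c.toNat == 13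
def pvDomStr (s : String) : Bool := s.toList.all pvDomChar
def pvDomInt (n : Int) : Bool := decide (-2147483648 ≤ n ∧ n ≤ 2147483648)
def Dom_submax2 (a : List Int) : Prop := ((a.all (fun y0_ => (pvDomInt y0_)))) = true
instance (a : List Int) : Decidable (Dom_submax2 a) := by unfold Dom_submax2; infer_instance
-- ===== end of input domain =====

-- B sorts once and does a single run-length scan carrying the previous distinct value
-- and its run length, instead of A's repeated count scans for every element.
-- ===== PORT A =====
def submax2 (a : List Int) : Int :=
  let s := PySem.List.sorted a (fun x => x) false
  s.foldl (fun maxv i =>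
    let c : Int := (s.count i : Int)
    let d : Int := (s.count (i - 1) : Int)
    let c := c + d
    if c > maxv then c else maxv) 0

-- ===== PORT B =====
-- the outer while loop of Source B; the inner `while s[j] == s[i]` scan is the takeWhile/dropWhile split
def submax2Loop (l : List Int) (prev : Option Int) (pc : Int) (best : Int) : Int :=
  match l with
  | [] => best
  | x :: rest =>
      let run := rest.takeWhile (fun y => y == x)
      let rest' := rest.dropWhile (fun y => y == x)
      let c : Int := 1 + (run.length : Int)
      let t := c + (if prev = some (x - 1) then pc else 0)
      let best' := if t > best then t else best
      submax2Loop rest' (some x) c best'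
termination_by l.length
decreasing_by
  simp only [List.length_cons]
  exact Nat.lt_succ_of_le (List.length_dropWhile_le _ _)

def submax2_alt (a : List Int) : Int :=
  let s := PySem.List.sorted a (fun x => x) false
  submax2Loop s none 0 0

-- ===== PRECONDITION & SPEC =====
def Spec_submax2 (a : List Int) (out : Int) : Prop := out = submax2_alt a
instance (a : List Int) (out : Int) : Decidable (Spec_submax2 a out) := by unfold Spec_submax2; infer_instance

-- ===== CLAIM =====
def Claim_equal_submax2 : Prop := ∀ (a : List Int), Dom_submax2 a → Spec_submax2 a (submax2 a)

-- ===== LEMMAS AND PROOFS =====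
-- g a v = a.count v + a.count (v-1), the quantity both programs maximise
def pvG (a : List Int) (v : Int) : Int := (a.count v : Int) + (a.count (v - 1) : Int)

-- running max of pvG over a list
def pvM (a l : List Int) (init : Int) : Int :=
  l.foldl (fun m x => max m (pvG a x)) init

theorem submax2_eq_pvM (a : List Int) :
    submax2 a = pvM a (PySem.List.sorted a (fun x => x) false) 0 := by
  unfold submax2 pvM
  have hp : (PySem.List.sorted a (fun x => x) false).Perm a :=
    PySem.List.sorted_perm a (fun x => x) false
  apply PySem.List.foldl_congr_mem
  intro acc x _
  simp only [pvG, hp.count_eq, max_def]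
  split_ifs <;> omega

theorem pvM_const (a run : List Int) (init : Int)
    (h : ∀ y ∈ run, pvG a y ≤ init) : pvM a run init = init := by
  induction run with
  | nil => rfl
  | cons y t ih =>
    simp only [pvM, List.foldl_cons]
    rw [max_eq_left (h y (by simp))]
    exact ih (fun z hz => h z (by simp [hz]))

theorem pvM_append (a l₁ l₂ : List Int) (init : Int) :
    pvM a (l₁ ++ l₂) init = pvM a l₂ (pvM a l₁ init) := by
  simp [pvM, List.foldl_append]

-- everything left after dropping the leading run of x in a sorted ≥ x list is > x
theorem dropWhile_run_gt (x : Int) :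
    ∀ (rest : List Int), rest.Pairwise (· ≤ ·) → (∀ y ∈ rest, x ≤ y) →
    ∀ v ∈ rest.dropWhile (fun y => y == x), x < v := by
  intro rest
  induction rest with
  | nil => intro _ _ v hv; simp [List.dropWhile] at hv
  | cons y t ih =>
    intro hp hb v hv
    by_cases hy : y = x
    · rw [List.dropWhile_cons] at hv
      simp [hy] at hv
      exact ih hp.of_cons (fun z hz => hb z (by simp [hz])) v hv
    · rw [List.dropWhile_cons] at hv
      have : (y == x) = false := by simp [hy]
      simp [this] at hv
      have hxy : x < y := lt_of_le_of_ne (hb y (by simp)) (Ne.symm hy)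
      rcases hv with rfl | hv
      · exact hxy
      · exact lt_of_lt_of_le hxy (List.rel_of_pairwise_cons hp hv)

-- the invariant-carrying characterisation of the run-length loop
theorem submax2Loop_eq_pvM (a : List Int) (l : List Int) (prev : Option Int) (pc best : Int) :
    l.Pairwise (· ≤ ·) →
    (∀ v ∈ l, a.count v = l.count v) →
    (∀ v ∈ l, prev = some (v - 1) → pc = (a.count (v - 1) : Int)) →
    (∀ v ∈ l, prev ≠ some (v - 1) → a.count (v - 1) = l.count (v - 1)) →
    (∀ q, prev = some q → ∀ v ∈ l, q < v) →
    submax2Loop l prev pc best = pvM a l best := by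
  induction l, prev, pc, best using submax2Loop.induct with
  | case1 prev pc best =>
    intro _ _ _ _ _
    rw [submax2Loop]; rfl
  | case2 prev pc best x rest run0 rest0 c0 t0 best0 ih =>
    intro hsort hcnt hp1 hp2 hq
    have hrun : run0 = rest.takeWhile (fun y => y == x) := rfl
    have hrest' : rest0 = rest.dropWhile (fun y => y == x) := rfl
    have hc : c0 = 1 + ((run0.length : Nat) : Int) := rfl
    have ht : t0 = c0 + (if prev = some (x - 1) then pc else 0) := rfl
    have hbest' : best0 = if t0 > best then t0 else best := rfl
    rw [submax2Loop]
    show submax2Loop rest0 (some x) c0 best0 = pvM a (x :: rest) best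
    have hsplit : rest = run0 ++ rest0 := (List.takeWhile_append_dropWhile).symm
    have hrunx : ∀ y ∈ run0, y = x := by
      intro y hy
      have := List.mem_takeWhile_imp (hrun ▸ hy)
      simpa using this
    have hbound : ∀ y ∈ rest, x ≤ y := fun y hy => List.rel_of_pairwise_cons hsort hy
    have hgt : ∀ v ∈ rest0, x < v := by
      rw [hrest']
      exact dropWhile_run_gt x rest hsort.of_cons hbound
    have hmemrest' : ∀ v ∈ rest0, v ∈ x :: rest := by
      intro v hv
      have : v ∈ rest := hsplit ▸ List.mem_append_right run0 hv
      simp [this]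
    -- counts of the head value
    have hrest'x : rest0.count x = 0 := by
      rw [List.count_eq_zero]
      intro hx; exact absurd (hgt x hx) (lt_irrefl x)
    have hruncount : run0.count x = run0.length := by
      rw [List.count_eq_length]
      intro y hy; simp [hrunx y hy]
    have hlcx : (x :: rest).count x = 1 + run0.length := by
      rw [List.count_cons_self, hsplit, List.count_append, hruncount, hrest'x]
      omega
    have hcx : c0 = ((x :: rest).count x : Int) := by
      rw [hlcx, hc]; push_cast; ring
    have hax : a.count x = (x :: rest).count x := hcnt x (by simp)
    -- a.count (x-1) is pc if prev matches, else 0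
    have hneigh : (if prev = some (x - 1) then pc else 0) = (a.count (x - 1) : Int) := by
      by_cases hpm : prev = some (x - 1)
      · rw [if_pos hpm]; exact hp1 x (by simp) hpm
      · rw [if_neg hpm]
        have h0 : (x :: rest).count (x - 1) = 0 := by
          rw [List.count_eq_zero]
          intro hmem
          rcases List.mem_cons.mp hmem with h | h
          · omega
          · have := hbound _ h; omega
        rw [hp2 x (by simp) hpm, h0]; rfl
    have htg : t0 = pvG a x := by
      rw [ht, hcx, hneigh, pvG, hax]
    have hbestmax : best0 = max best (pvG a x) := by
      rw [hbest', htg, max_def]; split_ifs <;> omega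
    -- pvM over the head run collapses to one max step
    have hpvml : pvM a (x :: rest) best = pvM a rest0 best0 := by
      have hdec : x :: rest = (x :: run0) ++ rest0 := by rw [hsplit]; rfl
      rw [hdec, pvM_append, hbestmax]
      congr 1
      show pvM a (x :: run0) best = max best (pvG a x)
      have hstep : pvM a (x :: run0) best = pvM a run0 (max best (pvG a x)) := by
        simp [pvM, List.foldl_cons]
      rw [hstep]
      exact pvM_const a run0 _ (fun y hy => by rw [hrunx y hy]; exact le_max_right _ _)
    rw [hpvml]
    -- re-establish the invariant for the tail
    apply ih
    · have : rest0.Sublist rest := hrest' ▸ List.dropWhile_sublist _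
      exact hsort.of_cons.sublist this
    · intro v hv
      have hvgt := hgt v hv
      have hl : (x :: rest).count v = rest0.count v := by
        rw [hsplit]
        rw [show x :: (run0 ++ rest0) = (x :: run0) ++ rest0 from rfl, List.count_append]
        have : (x :: run0).count v = 0 := by
          rw [List.count_eq_zero]
          intro hm
          rcases List.mem_cons.mp hm with h | h
          · omega
          · rw [hrunx v h] at hvgt; omega
        omega
      rw [← hl]; exact hcnt v (hmemrest' v hv)
    · intro v hv heq
      have hvx : v - 1 = x := by injection heq with h; omega
      rw [hvx, hcx, ← hax]
    · intro v hv hne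
      have hvgt : x < v := hgt v hv
      have hvx : v - 1 ≠ x := by intro h; apply hne; rw [← h]
      have hv1gt : x < v - 1 := by omega
      have hprevne : prev ≠ some (v - 1) := by
        intro h
        rcases hp : prev with _ | q
        · rw [hp] at h; exact absurd h (by simp)
        · have hq' := hq q hp x (by simp)
          rw [hp] at h; injection h with h'; omega
      have hmain := hp2 v (hmemrest' v hv) hprevne
      rw [hmain, hsplit]
      rw [show x :: (run0 ++ rest0) = (x :: run0) ++ rest0 from rfl, List.count_append]
      have : (x :: run0).count (v - 1) = 0 := by
        rw [List.count_eq_zero]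
        intro hm
        rcases List.mem_cons.mp hm with h | h
        · omega
        · rw [hrunx _ h] at hv1gt; omega
      omega
    · intro q hqe v hv
      injection hqe with h; rw [← h]; exact hgt v hv

-- ===== VERDICT =====
theorem submax2_spec : Claim_equal_submax2 := by
  intro a _
  unfold Spec_submax2 submax2_alt
  rw [submax2_eq_pvM]
  have hperm : (PySem.List.sorted a (fun x => x) false).Perm a :=
    PySem.List.sorted_perm a (fun x => x) false
  show pvM a (PySem.List.sorted a (fun x => x) false) 0 =
    submax2Loop (PySem.List.sorted a (fun x => x) false) none 0 0
  refine (submax2Loop_eq_pvM a _ none 0 0 ?_ ?_ ?_ ?_ ?_).symm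
  · exact PySem.List.sorted_pairwise a (fun x => x)
  · intro v _; exact (hperm.count_eq v).symm
  · intro v _ h; exact absurd h (by simp)
  · intro v _ _; exact (hperm.count_eq (v - 1)).symm
  · intro q h; exact absurd h (by simp)
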